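-- pv_equiv track=rewrite | github.com/Jokercldai/loglith | loglith/toolkit/preprocess_data_1.py | Statistical_sample_location
-- ===== SOURCE A (Python) =====
-- from collections import defaultdict
--
-- def Statistical_sample_location(data2d):
--     """统计选择的样本的位置，
--     data:二维数组，前三列表示inline xline twt 第四列为1用于统计"""
--     #使用一个字典来统计每一组前三列相同的行的第四列的和。
--     # #将字典中的数据转换为一个列表，并按照要求排序。
--     # # Step 1: Use a dictionary to sum the fourth column for rows with the same first three columns
--     summary_dict = defaultdict(int)
--     for row in data2d:
--         key = tuple(row[:3])
--         summary_dict[key] += row[3]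
--
--     # Step 2: Convert the dictionary to a sorted list
--     result = [[*key, value] for key, value in summary_dict.items()]
--     result.sort()
--     return result
-- ===== SOURCE B (Python) =====
-- def Statistical_sample_location(data2d):
--     """统计选择的样本的位置 — same result via sort-then-linear-sweep instead of a dict."""
--     rows = sorted(data2d, key=lambda r: r[:3])
--     result = []
--     cur_key = None
--     cur_sum = 0
--     for row in rows:
--         k = row[:3]
--         if k == cur_key:
--             cur_sum += row[3]
--         else:
--             if cur_key is not None:
--                 result.append(cur_key + [cur_sum])
--             cur_key = k
--             cur_sum = row[3]
--     if cur_key is not None: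
--         result.append(cur_key + [cur_sum])
--     return result
-- ===== Notes on version B (the rewrite author's own statement) =====
-- stated objective: alternative
-- what changed: Replaces the defaultdict accumulation plus final sort by sorting the rows once on their first three columns and then doing a single linear sweep that emits one aggregated row per key group.
import Mathlib
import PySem

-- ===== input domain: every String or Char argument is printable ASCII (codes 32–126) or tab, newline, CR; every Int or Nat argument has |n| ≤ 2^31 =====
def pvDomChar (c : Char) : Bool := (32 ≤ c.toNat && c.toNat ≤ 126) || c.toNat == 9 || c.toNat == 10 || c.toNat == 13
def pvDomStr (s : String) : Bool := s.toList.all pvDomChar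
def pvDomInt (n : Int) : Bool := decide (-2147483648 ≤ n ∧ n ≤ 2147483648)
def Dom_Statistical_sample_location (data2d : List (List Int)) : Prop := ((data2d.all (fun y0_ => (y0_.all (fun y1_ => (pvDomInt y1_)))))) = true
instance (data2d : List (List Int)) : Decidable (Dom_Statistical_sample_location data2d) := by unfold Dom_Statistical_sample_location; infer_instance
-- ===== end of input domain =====

-- B replaces A's defaultdict accumulation by sort-on-a-key-then-linear-sweep (alternative algorithm, same exact output).

-- row[:3] and row[3], shared by both ports (both Pythons compute exactly these)
def pvKey (row : List Int) : List Int := PySem.List.slice row none (some 3)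
def pvVal (row : List Int) : Int := (PySem.List.pyGet? row 3).getD 0  -- in range under Pre_

-- ===== PORT A =====
def Statistical_sample_location (data2d : List (List Int)) : List (List Int) :=
  let d := data2d.foldl (fun d row => d.modify (pvKey row) 0 (fun v => v + pvVal row)) PySem.Dict.empty
  let result := d.items.map (fun p => p.1 ++ [p.2])
  PySem.List.sorted result (fun x => x) false

-- ===== PORT B =====
-- loop state: (cur_key, cur_sum, result)
def pvStep (st : Option (List Int) × Int × List (List Int)) (row : List Int) :
    Option (List Int) × Int × List (List Int) :=
  let k := pvKey row
  match st with
  | (some ck, s, res) =>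
      if k = ck then (some ck, s + pvVal row, res)
      else (some k, pvVal row, res ++ [ck ++ [s]])
  | (none, _, res) => (some k, pvVal row, res)

-- the trailing "if cur_key is not None: result.append(...)"
def pvFinish (st : Option (List Int) × Int × List (List Int)) : List (List Int) :=
  match st with
  | (some ck, s, res) => res ++ [ck ++ [s]]
  | (none, _, res) => res

def Statistical_sample_location_alt (data2d : List (List Int)) : List (List Int) :=
  let rows := PySem.List.sorted data2d pvKey false
  pvFinish (rows.foldl pvStep (none, 0, []))

-- ===== PRECONDITION & SPEC =====
-- Pre_ excludes exactly the inputs on which the Python A raises IndexError (some row has no row[3]).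
def Pre_Statistical_sample_location (data2d : List (List Int)) : Prop :=
  ∀ row ∈ data2d, 4 ≤ row.length
instance (data2d : List (List Int)) : Decidable (Pre_Statistical_sample_location data2d) := by
  unfold Pre_Statistical_sample_location; infer_instance

def pvWitness_Statistical_sample_location : List (List Int) :=
  [[1, 2, 3, 1], [1, 2, 3, 1], [0, 5, 6, 2]]

def Spec_Statistical_sample_location (data2d : List (List Int)) (out : List (List Int)) : Prop := out = Statistical_sample_location_alt data2d
instance (data2d : List (List Int)) (out : List (List Int)) : Decidable (Spec_Statistical_sample_location data2d out) := by unfold Spec_Statistical_sample_location; infer_instance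

-- ===== CLAIM (what is proved, stated in full; the proofs are below) =====
def Claim_equal_Statistical_sample_location : Prop := ∀ (data2d : List (List Int)), Dom_Statistical_sample_location data2d → Pre_Statistical_sample_location data2d → Spec_Statistical_sample_location data2d (Statistical_sample_location data2d)

-- ===== LEMMAS AND PROOFS =====

-- total of row[3] over the rows of l whose key is k
def pvT (l : List (List Int)) (k : List Int) : Int :=
  ((l.filter (fun r => pvKey r == k)).map pvVal).sum

theorem pvT_nil (k : List Int) : pvT [] k = 0 := rfl

theorem pvT_cons (r : List Int) (l : List (List Int)) (k : List Int) :
    pvT (r :: l) k = (if pvKey r = k then pvVal r else 0) + pvT l k := by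
  by_cases h : pvKey r = k <;> simp [pvT, h]

theorem pvT_eq_zero (l : List (List Int)) (k : List Int) (h : ∀ r ∈ l, pvKey r ≠ k) : pvT l k = 0 := by
  unfold pvT
  rw [List.filter_eq_nil_iff.mpr (fun r hr => by simpa using h r hr)]
  rfl

theorem pvT_perm (l l' : List (List Int)) (k : List Int) (h : l.Perm l') : pvT l k = pvT l' k :=
  ((h.filter _).map _).sum_eq

-- A's dictionary: every lookup is the per-key total
theorem pvA_getD (l : List (List Int)) :
    ∀ (d : PySem.Dict (List Int) Int) (k : List Int),
      (l.foldl (fun d row => d.modify (pvKey row) 0 (fun v => v + pvVal row)) d).getD k 0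
        = d.getD k 0 + pvT l k := by
  induction l with
  | nil => intro d k; simp [pvT_nil]
  | cons r l ih =>
    intro d k
    rw [List.foldl_cons, ih, PySem.Dict.getD_modify, pvT_cons]
    by_cases h : k = pvKey r
    · subst h; rw [if_pos rfl, if_pos rfl]; omega
    · rw [if_neg h, if_neg (fun hh => h hh.symm)]; omega

-- A's pre-sort list, in closed form: one row per distinct key, in first-occurrence order
theorem pvA_pre (data2d : List (List Int)) :
    ((data2d.foldl (fun d row => d.modify (pvKey row) 0 (fun v => v + pvVal row))
        PySem.Dict.empty).items.map (fun p => p.1 ++ [p.2]))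
      = (PySem.Set.ofList (data2d.map pvKey)).map (fun k => k ++ [pvT data2d k]) := by
  have hnd : (data2d.foldl (fun d row => d.modify (pvKey row) 0 (fun v => v + pvVal row))
      (PySem.Dict.empty : PySem.Dict (List Int) Int)).keys.Nodup :=
    PySem.Dict.nodup_keys_foldl_modify_key data2d pvKey 0 _ _ PySem.Dict.nodup_keys_empty
  have hkeys : (data2d.foldl (fun d row => d.modify (pvKey row) 0 (fun v => v + pvVal row))
      (PySem.Dict.empty : PySem.Dict (List Int) Int)).keys = PySem.Set.ofList (data2d.map pvKey) := by
    rw [PySem.Dict.keys_foldl_modify_key data2d pvKey 0 (fun _ row v => v + pvVal row),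
        PySem.Dict.keys_empty, PySem.Set.update_nil_left]
  rw [PySem.Dict.items_eq_map_keys _ hnd 0, hkeys, List.map_map]
  refine List.map_congr_left (fun k _ => ?_)
  simp only [Function.comp]
  rw [pvA_getD, PySem.Dict.getD_empty]
  simp

-- ofList is a sublist of its argument
theorem pvOfList_sublist (l : List (List Int)) : (PySem.Set.ofList l).Sublist l := by
  induction l with
  | nil => simp [PySem.Set.ofList]
  | cons x xs ih =>
    rw [PySem.Set.ofList_cons]
    exact List.Sublist.cons₂ x (List.Sublist.trans (by simp [PySem.Set.discard]) ih)

-- filter commutes with ofList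
theorem pvFilter_ofList (p : List Int → Bool) (l : List (List Int)) :
    (PySem.Set.ofList l).filter p = PySem.Set.ofList (l.filter p) := by
  induction l with
  | nil => rfl
  | cons x xs ih =>
    rw [PySem.Set.ofList_cons]
    by_cases hp : p x
    · rw [List.filter_cons_of_pos hp, List.filter_cons_of_pos hp, PySem.Set.ofList_cons, ← ih]
      simp only [PySem.Set.discard, List.filter_filter]
      congr 1
      exact List.filter_congr (fun a _ => by rw [Bool.and_comm])
    · rw [List.filter_cons_of_neg hp, List.filter_cons_of_neg hp, ← ih]
      simp only [PySem.Set.discard, List.filter_filter]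
      refine List.filter_congr (fun a _ => ?_)
      by_cases hax : a = x
      · subst hax; simp [hp]
      · simp [hax]

theorem pvDiscard_ofList (l : List (List Int)) (x : List Int) :
    PySem.Set.discard (PySem.Set.ofList l) x = PySem.Set.ofList (l.filter (fun y => !(y == x))) := by
  rw [← pvFilter_ofList]
  simp [PySem.Set.discard]

-- members of the deduped tail key list differ from the current key
theorem pvMem_tailset (l : List (List Int)) (c k : List Int)
    (h : k ∈ PySem.Set.ofList ((l.filter (fun r => !(pvKey r == c))).map pvKey)) : k ≠ c := by
  rw [PySem.Set.mem_ofList] at h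
  obtain ⟨r, hr, rfl⟩ := List.mem_map.mp h
  simpa using (List.mem_filter.mp hr).2

-- lexicographic order: appending one element to equal-length lists preserves <
theorem pvLex_append (a : List Int) : ∀ (b : List Int) (x y : Int),
    a.length = b.length → a < b → a ++ [x] < b ++ [y] := by
  induction a with
  | nil =>
    intro b x y hlen h
    cases b with
    | nil => cases h
    | cons => simp at hlen
  | cons c cs ih =>
    intro b x y hlen h
    cases b with
    | nil => simp at hlen
    | cons d ds =>
      cases h with
      | cons h' => exact List.Lex.cons (ih ds x y (by simpa using hlen) h')
      | rel hr => exact List.Lex.rel hr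

-- the sweep: on key-sorted input, the fold emits one aggregated row per distinct key
theorem pvSweep (l : List (List Int)) :
    ∀ (ck : List Int) (s : Int) (acc : List (List Int)),
      l.Pairwise (fun a b => pvKey a ≤ pvKey b) → (∀ r ∈ l, ck ≤ pvKey r) →
      pvFinish (l.foldl pvStep (some ck, s, acc))
        = acc ++ (ck ++ [s + pvT l ck]) ::
            (PySem.Set.ofList ((l.filter (fun r => !(pvKey r == ck))).map pvKey)).map
              (fun k => k ++ [pvT l k]) := by
  induction l with
  | nil => intro ck s acc _ _; simp [pvFinish, pvT_nil, PySem.Set.ofList]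
  | cons r l ih =>
    intro ck s acc hp hlb
    obtain ⟨hhead, htail⟩ := List.pairwise_cons.mp hp
    rw [List.foldl_cons]
    by_cases h : pvKey r = ck
    · have hstep : pvStep (some ck, s, acc) r = (some ck, s + pvVal r, acc) := by
        simp [pvStep, h]
      rw [hstep, ih ck (s + pvVal r) acc htail (fun r' hr' => h ▸ hhead r' hr')]
      have hfl : (r :: l).filter (fun r => !(pvKey r == ck)) = l.filter (fun r => !(pvKey r == ck)) := by
        rw [List.filter_cons_of_neg (by simp [h])]
      rw [hfl]
      congr 1
      congr 1
      · rw [pvT_cons, if_pos h, ← add_assoc]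
      · refine List.map_congr_left (fun k hk => ?_)
        have hne : k ≠ ck := pvMem_tailset l ck k hk
        rw [pvT_cons, if_neg (fun e => hne (e.symm.trans h))]
        simp
    · have hstep : pvStep (some ck, s, acc) r = (some (pvKey r), pvVal r, acc ++ [ck ++ [s]]) := by
        simp [pvStep, h]
      have hlt : ∀ r' ∈ l, ck < pvKey r' := by
        intro r' hr'
        exact lt_of_lt_of_le (lt_of_le_of_ne (hlb r (by simp)) (fun e => h e.symm)) (hhead r' hr')
      rw [hstep, ih (pvKey r) (pvVal r) (acc ++ [ck ++ [s]]) htail hhead]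
      have hTck : pvT l ck = 0 := pvT_eq_zero l ck (fun r' hr' e => absurd (e ▸ hlt r' hr') (lt_irrefl _))
      have hfl : (r :: l).filter (fun r => !(pvKey r == ck)) = r :: l := by
        rw [List.filter_cons_of_pos (by simp [h])]
        congr 1
        exact List.filter_eq_self.mpr (fun r' hr' => by
          simp; exact fun e => absurd (e ▸ hlt r' hr') (lt_irrefl _))
      rw [hfl]
      have hof : PySem.Set.ofList ((r :: l).map pvKey)
          = pvKey r :: PySem.Set.ofList ((l.filter (fun r' => !(pvKey r' == pvKey r))).map pvKey) := by
        rw [List.map_cons, PySem.Set.ofList_cons, pvDiscard_ofList, List.filter_map]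
        rfl
      rw [hof, List.map_cons]
      rw [pvT_cons, if_neg h, hTck]
      rw [pvT_cons, if_pos rfl]
      have htailmap : (PySem.Set.ofList ((l.filter (fun r' => !(pvKey r' == pvKey r))).map pvKey)).map
            (fun k => k ++ [pvT (r :: l) k])
          = (PySem.Set.ofList ((l.filter (fun r' => !(pvKey r' == pvKey r))).map pvKey)).map
            (fun k => k ++ [pvT l k]) := by
        refine List.map_congr_left (fun k hk => ?_)
        have hne : k ≠ pvKey r := pvMem_tailset l (pvKey r) k hk
        rw [pvT_cons, if_neg (fun e => hne e.symm)]
        simp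
      rw [htailmap]
      simp

-- B on a nonempty key-sorted list of rows: one aggregated row per distinct key, keys in order
theorem pvB_closed (r0 : List Int) (rest : List (List Int))
    (hpw : (r0 :: rest).Pairwise (fun a b => pvKey a ≤ pvKey b)) :
    pvFinish ((r0 :: rest).foldl pvStep (none, 0, []))
      = (PySem.Set.ofList ((r0 :: rest).map pvKey)).map (fun k => k ++ [pvT (r0 :: rest) k]) := by
  obtain ⟨hhead, htail⟩ := List.pairwise_cons.mp hpw
  rw [List.foldl_cons]
  have hstep : pvStep (none, 0, []) r0 = (some (pvKey r0), pvVal r0, []) := rfl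
  rw [hstep, pvSweep rest (pvKey r0) (pvVal r0) [] htail hhead]
  have hof : PySem.Set.ofList ((r0 :: rest).map pvKey)
      = pvKey r0 :: PySem.Set.ofList ((rest.filter (fun r' => !(pvKey r' == pvKey r0))).map pvKey) := by
    rw [List.map_cons, PySem.Set.ofList_cons, pvDiscard_ofList, List.filter_map]
    rfl
  rw [hof, List.map_cons]
  rw [pvT_cons, if_pos rfl]
  have htailmap : (PySem.Set.ofList ((rest.filter (fun r' => !(pvKey r' == pvKey r0))).map pvKey)).map
        (fun k => k ++ [pvT (r0 :: rest) k])
      = (PySem.Set.ofList ((rest.filter (fun r' => !(pvKey r' == pvKey r0))).map pvKey)).map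
        (fun k => k ++ [pvT rest k]) := by
    refine List.map_congr_left (fun k hk => ?_)
    have hne : k ≠ pvKey r0 := pvMem_tailset rest (pvKey r0) k hk
    rw [pvT_cons, if_neg (fun e => hne e.symm)]
    simp
  rw [htailmap]
  simp

-- the two ports elaborate `sorted` with core's DecidableLT; the PySem order lemmas state it with the
-- LinearOrder's (the underlying LT is definitionally the same): bridge the Decidable instance
theorem pvSorted_lin (xs : List (List Int)) (key : List Int → List Int) :
    PySem.List.sorted xs key false
      = @PySem.List.sorted (List Int) (List Int)
          (@Preorder.toLT _ (@PartialOrder.toPreorder _ (@LinearOrder.toPartialOrder _ List.instLinearOrder)))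
          (@LinearOrder.toDecidableLT _ List.instLinearOrder) xs key false := by
  congr 1

-- ===== VERDICT (by name: the statement is the Claim_ definition above) =====
theorem Statistical_sample_location_spec : Claim_equal_Statistical_sample_location := by
  intro data2d _ hpre
  unfold Spec_Statistical_sample_location Statistical_sample_location Statistical_sample_location_alt
  simp only []
  rw [pvA_pre, pvSorted_lin, pvSorted_lin]
  cases hrows : @PySem.List.sorted (List Int) (List Int)
      (@Preorder.toLT _ (@PartialOrder.toPreorder _ (@LinearOrder.toPartialOrder _ List.instLinearOrder)))
      (@LinearOrder.toDecidableLT _ List.instLinearOrder) data2d pvKey false with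
  | nil =>
    have hnil : data2d = [] := (@PySem.List.sorted_eq_nil_iff (List Int) (List Int) _ (@LinearOrder.toDecidableLT _ List.instLinearOrder) data2d pvKey false).mp hrows
    subst hnil
    rfl
  | cons r0 rest =>
    have hperm : (r0 :: rest).Perm data2d := hrows ▸ @PySem.List.sorted_perm (List Int) (List Int) _ (@LinearOrder.toDecidableLT _ List.instLinearOrder) data2d pvKey false
    have hpw : (r0 :: rest).Pairwise (fun a b => pvKey a ≤ pvKey b) := by
      have h := PySem.List.sorted_pairwise data2d pvKey
      rwa [hrows] at h
    rw [pvB_closed r0 rest hpw]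
    -- rewrite B's totals over sorted rows as totals over data2d
    have hBtot : (PySem.Set.ofList ((r0 :: rest).map pvKey)).map (fun k => k ++ [pvT (r0 :: rest) k])
        = (PySem.Set.ofList ((r0 :: rest).map pvKey)).map (fun k => k ++ [pvT data2d k]) :=
      List.map_congr_left (fun k _ => by rw [pvT_perm _ _ _ hperm])
    rw [hBtot]
    -- every key has length 3
    have hklen : ∀ k ∈ PySem.Set.ofList ((r0 :: rest).map pvKey), k.length = 3 := by
      intro k hk
      rw [PySem.Set.mem_ofList] at hk
      obtain ⟨r, hr, rfl⟩ := List.mem_map.mp hk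
      have hr' : r ∈ data2d := hperm.mem_iff.mp hr
      have h4 := hpre r hr'
      simp [pvKey, PySem.List.slice]
      omega
    -- the deduped key list is strictly increasing
    have hks_le : (PySem.Set.ofList ((r0 :: rest).map pvKey)).Pairwise (· ≤ ·) :=
      List.Pairwise.sublist (pvOfList_sublist _) (List.pairwise_map.mpr hpw)
    have hks_lt : (PySem.Set.ofList ((r0 :: rest).map pvKey)).Pairwise (· < ·) :=
      (hks_le.and (PySem.Set.nodup_ofList _)).imp (fun hab => lt_of_le_of_ne hab.1 hab.2)
    refine PySem.List.sorted_eq_of_perm_of_pairwise_lt _ _ _ ?_ ?_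
    · -- permutation with A's pre-sort list
      refine List.Perm.map _ ?_
      refine (List.perm_ext_iff_of_nodup (PySem.Set.nodup_ofList _) (PySem.Set.nodup_ofList _)).mpr ?_
      intro k
      rw [PySem.Set.mem_ofList, PySem.Set.mem_ofList]
      constructor
      · intro hk
        obtain ⟨r, hr, rfl⟩ := List.mem_map.mp hk
        exact List.mem_map.mpr ⟨r, hperm.mem_iff.mp hr, rfl⟩
      · intro hk
        obtain ⟨r, hr, rfl⟩ := List.mem_map.mp hk
        exact List.mem_map.mpr ⟨r, hperm.mem_iff.mpr hr, rfl⟩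
    · -- strictly increasing under the identity key
      refine List.pairwise_map.mpr ?_
      refine List.Pairwise.imp_of_mem (fun {a b} ha hb hab => ?_) hks_lt
      exact pvLex_append a b _ _ ((hklen a ha).trans (hklen b hb).symm) hab
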